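-- pv_equiv track=rewrite | github.com/ozhehkovski/worldpostalcode | postals.py | sitemap_filter
-- ===== SOURCE A (Python) =====
-- def sitemap_filter(entries):
--     for entry in entries:
--         url = entry['loc']
--         if any(keyword in url.lower() for keyword in [
--             '/canada/',
--                   '/united-states/',
--                   '/argentina/',
--                   '/chile/',
--                   '/finland/',
--                   '/hungary/',
--                   '/moldova/',
--                   '/portugal/',
--                   '/slovenia/',
--                   '/france/',
--                   '/romania/',
--                   '/spain/',
--                   '/austria/',
--                   '/czech-republic/',
--                   '/germany/',
--                   '/sweden/',
--                   '/denmark/',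
--                   '/netherlands/',
--                   '/italy/',
--                   '/norway/',
--                   '/poland/',
--                   '/united-kingdom/',
--                   '/japan/',
--                   '/kazakhstan/',
--                   '/new-zealand/',
--                   '/south-africa/',
--                   '/algeria/',
--                   '/nigeria/',
--                   '/australia/',
--                   '/morocco/',
--                   '/kuwait/',
--                   '/thailand/',
--                   '/singapore/',
--                   '/armenia/'
--         ]):
--             yield entry
-- ===== SOURCE B (Python) =====
-- _COUNTRIES = frozenset([
--     'canada', 'united-states', 'argentina', 'chile', 'finland', 'hungary',
--     'moldova', 'portugal', 'slovenia', 'france', 'romania', 'spain',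
--     'austria', 'czech-republic', 'germany', 'sweden', 'denmark',
--     'netherlands', 'italy', 'norway', 'poland', 'united-kingdom', 'japan',
--     'kazakhstan', 'new-zealand', 'south-africa', 'algeria', 'nigeria',
--     'australia', 'morocco', 'kuwait', 'thailand', 'singapore', 'armenia',
-- ])
--
--
-- def sitemap_filter(entries):
--     # A keyword '/name/' occurs in the URL iff 'name' is a slash-delimited
--     # interior segment: tokenize each URL once and intersect its interior
--     # segments with the country set, collecting matches into a list.
--     kept = []
--     for entry in entries:
--         segments = entry['loc'].lower().split('/')
--         if not _COUNTRIES.isdisjoint(segments[1:-1]):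
--             kept.append(entry)
--     return kept
-- ===== Notes on version B (the rewrite author's own statement) =====
-- stated objective: alternative
-- what changed: B tokenizes each URL once on '/' and intersects its interior segments with a precomputed country set (frozenset.isdisjoint), collecting matches into an accumulator list, instead of A's generator that runs 34 independent keyword-substring scans per URL.
import Mathlib
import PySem

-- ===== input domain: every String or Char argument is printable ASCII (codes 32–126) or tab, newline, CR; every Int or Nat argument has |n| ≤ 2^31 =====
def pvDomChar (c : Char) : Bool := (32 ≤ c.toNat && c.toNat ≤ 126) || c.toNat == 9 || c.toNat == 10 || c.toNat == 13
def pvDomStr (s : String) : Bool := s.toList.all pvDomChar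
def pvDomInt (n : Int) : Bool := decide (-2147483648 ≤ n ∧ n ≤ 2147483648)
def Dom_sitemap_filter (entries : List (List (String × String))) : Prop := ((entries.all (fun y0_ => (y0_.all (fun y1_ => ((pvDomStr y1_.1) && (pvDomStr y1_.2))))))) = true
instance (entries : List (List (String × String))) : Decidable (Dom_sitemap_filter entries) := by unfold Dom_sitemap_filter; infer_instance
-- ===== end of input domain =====

-- B tokenizes each URL once on '/' and intersects the interior segments with a set of
-- country names via an accumulator loop returning a list, instead of A's generator doing
-- 34 independent keyword-substring scans per URL (objective: alternative; equivalence of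
-- RETURN values — Python A is a generator, compared here as the list of yielded entries).

-- ===== PORT A =====
def pvKeywords : List String := [
  "/canada/", "/united-states/", "/argentina/", "/chile/", "/finland/",
  "/hungary/", "/moldova/", "/portugal/", "/slovenia/", "/france/",
  "/romania/", "/spain/", "/austria/", "/czech-republic/", "/germany/",
  "/sweden/", "/denmark/", "/netherlands/", "/italy/", "/norway/",
  "/poland/", "/united-kingdom/", "/japan/", "/kazakhstan/",
  "/new-zealand/", "/south-africa/", "/algeria/", "/nigeria/",
  "/australia/", "/morocco/", "/kuwait/", "/thailand/", "/singapore/",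
  "/armenia/"]

def sitemap_filter (entries : List (List (String × String))) : List (List (String × String)) :=
  entries.filter (fun entry =>
    match PySem.Dict.get? (PySem.Dict.mk entry) "loc" with
    | some url => pvKeywords.any (fun keyword => PySem.Str.isIn keyword (PySem.Str.lower url))
    | none => false)   -- entry['loc'] raises KeyError: excluded by Pre_sitemap_filter

-- ===== PORT B =====
def pvNames : List String := [
  "canada", "united-states", "argentina", "chile", "finland",
  "hungary", "moldova", "portugal", "slovenia", "france",
  "romania", "spain", "austria", "czech-republic", "germany",
  "sweden", "denmark", "netherlands", "italy", "norway",
  "poland", "united-kingdom", "japan", "kazakhstan",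
  "new-zealand", "south-africa", "algeria", "nigeria",
  "australia", "morocco", "kuwait", "thailand", "singapore",
  "armenia"]

def pvCountries : PySem.Set String := PySem.Set.ofList pvNames

-- not _COUNTRIES.isdisjoint(entry['loc'].lower().split('/')[1:-1])
def pvWanted (entry : List (String × String)) : Bool :=
  match PySem.Dict.get? (PySem.Dict.mk entry) "loc" with
  | some url =>
      let segments := (PySem.Str.split? (PySem.Str.lower url) "/").getD []
      ! PySem.Set.isdisjoint pvCountries (PySem.List.slice segments (some 1) (some (-1)))
  | none => false   -- entry['loc'] raises KeyError: excluded by Pre_sitemap_filter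

-- the accumulator loop of Source B: kept grows front-wards, reversed at the end
def pvCollect (kept : List (List (String × String))) :
    List (List (String × String)) → List (List (String × String))
  | [] => kept.reverse
  | e :: rest => pvCollect (if pvWanted e then e :: kept else kept) rest

def sitemap_filter_alt (entries : List (List (String × String))) : List (List (String × String)) :=
  pvCollect [] entries

-- ===== PRECONDITION & SPEC =====
-- Pre_ excludes exactly the inputs where an entry lacks the key 'loc', on which
-- the Python A raises KeyError when the generator is consumed.
def Pre_sitemap_filter (entries : List (List (String × String))) : Prop :=
  (entries.all (fun entry => PySem.Dict.contains (PySem.Dict.mk entry) "loc")) = true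
instance (entries : List (List (String × String))) : Decidable (Pre_sitemap_filter entries) := by
  unfold Pre_sitemap_filter; infer_instance

def pvWitness_sitemap_filter : (List (List (String × String))) :=
  [[("loc", "/foo/canada/1.html")], [("loc", "/about/")]]

def Spec_sitemap_filter (entries : List (List (String × String))) (out : List (List (String × String))) : Prop := out = sitemap_filter_alt entries
instance (entries : List (List (String × String))) (out : List (List (String × String))) : Decidable (Spec_sitemap_filter entries out) := by unfold Spec_sitemap_filter; infer_instance

-- ===== CLAIM (what is proved, stated in full; the proofs are below) =====
def Claim_equal_sitemap_filter : Prop := ∀ (entries : List (List (String × String))), Dom_sitemap_filter entries → Pre_sitemap_filter entries → Spec_sitemap_filter entries (sitemap_filter entries)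

-- ===== LEMMAS AND PROOFS =====

-- the accumulator loop is filter with the kept prefix reversed in front
lemma pvCollect_eq (l : List (List (String × String))) :
    ∀ kept, pvCollect kept l = kept.reverse ++ l.filter pvWanted := by
  induction l with
  | nil => intro kept; simp [pvCollect]
  | cons e rest ih =>
      intro kept
      by_cases h : pvWanted e = true
      · simp [pvCollect, h, ih]
      · simp [pvCollect, h, ih]

-- A mirror of PySem.Chars.splitOn for the single-character separator '/'.
def pvSplit : List Char → List (List Char)
  | [] => [[]]
  | c :: rest => if c = '/' then [] :: pvSplit rest else (pvSplit rest).modifyHead (fun p => c :: p)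

lemma pvSplit_ne_nil (l : List Char) : pvSplit l ≠ [] := by
  induction l with
  | nil => simp [pvSplit]
  | cons c rest ih =>
      simp only [pvSplit]
      split
      · simp
      · cases h : pvSplit rest with
        | nil => exact absurd h ih
        | cons a t => simp

lemma pvSplit_go_eq (l : List Char) : ∀ (fuel : Nat) (cur : List Char) (acc : List (List Char)),
    l.length < fuel →
    PySem.Chars.splitOn.go ['/'] fuel l cur acc
      = acc.reverse ++ (pvSplit l).modifyHead (fun p => cur.reverse ++ p) := by
  induction l with
  | nil =>
      intro fuel cur acc hf
      cases fuel with
      | zero => omega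
      | succ f => simp [PySem.Chars.splitOn.go, pvSplit]
  | cons c rest ih =>
      intro fuel cur acc hf
      cases fuel with
      | zero => simp at hf
      | succ f =>
          by_cases hc : c = '/'
          · subst hc
            rw [show PySem.Chars.splitOn.go ['/'] (f+1) ('/' :: rest) cur acc
                  = PySem.Chars.splitOn.go ['/'] f (List.drop 1 ('/' :: rest)) [] (cur.reverse :: acc) by
                  simp [PySem.Chars.splitOn.go, List.isPrefixOf]]
            rw [List.drop_one, List.tail_cons]
            rw [ih f [] (cur.reverse :: acc) (by simp at hf; omega)]
            cases h : pvSplit rest with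
            | nil => exact absurd h (pvSplit_ne_nil rest)
            | cons a t => simp [pvSplit, h]
          · have hpre : List.isPrefixOf ['/'] (c :: rest) = false := by
              simp [List.isPrefixOf]
              exact fun h => absurd h.symm hc
            rw [show PySem.Chars.splitOn.go ['/'] (f+1) (c :: rest) cur acc
                  = PySem.Chars.splitOn.go ['/'] f rest (c :: cur) acc by
                  simp [PySem.Chars.splitOn.go, hpre]]
            rw [ih f (c :: cur) acc (by simp at hf; omega)]
            simp only [pvSplit, if_neg hc, List.modifyHead_modifyHead]
            congr 1
            cases h : pvSplit rest with
            | nil => exact absurd h (pvSplit_ne_nil rest)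
            | cons a t => simp [Function.comp]

lemma splitOn_eq_pvSplit (l : List Char) : PySem.Chars.splitOn l ['/'] = pvSplit l := by
  unfold PySem.Chars.splitOn
  rw [pvSplit_go_eq l (l.length + 1) [] [] (by omega)]
  cases h : pvSplit l with
  | nil => exact absurd h (pvSplit_ne_nil l)
  | cons a t => simp

-- join with '/' — the inverse of pvSplit
def pvJoin : List (List Char) → List Char
  | [] => []
  | [p] => p
  | p :: q :: rest => p ++ '/' :: pvJoin (q :: rest)

lemma pvJoin_cons_cons (c : Char) (q : List Char) (t : List (List Char)) :
    pvJoin ((c :: q) :: t) = c :: pvJoin (q :: t) := by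
  cases t <;> simp [pvJoin]

lemma pvJoin_pvSplit (l : List Char) : pvJoin (pvSplit l) = l := by
  induction l with
  | nil => simp [pvSplit, pvJoin]
  | cons c rest ih =>
      by_cases hc : c = '/'
      · subst hc
        simp only [pvSplit]
        cases h : pvSplit rest with
        | nil => exact absurd h (pvSplit_ne_nil rest)
        | cons a t => rw [h] at ih; simp [pvJoin, ih]
      · simp only [pvSplit, if_neg hc]
        cases h : pvSplit rest with
        | nil => exact absurd h (pvSplit_ne_nil rest)
        | cons a t =>
            rw [h] at ih
            simp only [List.modifyHead]
            rw [pvJoin_cons_cons, ih]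

lemma pvSplit_no_slash (l : List Char) : ∀ p ∈ pvSplit l, ('/' : Char) ∉ p := by
  induction l with
  | nil => intro p hp; simp [pvSplit] at hp; simp [hp]
  | cons c rest ih =>
      intro p hp
      by_cases hc : c = '/'
      · subst hc
        have hp' : p = [] ∨ p ∈ pvSplit rest := by simpa [pvSplit] using hp
        rcases hp' with h | h
        · simp [h]
        · exact ih p h
      · simp only [pvSplit, if_neg hc] at hp
        cases h : pvSplit rest with
        | nil => exact absurd h (pvSplit_ne_nil rest)
        | cons a t =>
            rw [h] at hp
            simp only [List.modifyHead, List.mem_cons] at hp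
            rcases hp with h1 | h1
            · subst h1
              intro hmem
              rcases List.mem_cons.mp hmem with h2 | h2
              · exact hc h2.symm
              · exact ih a (h ▸ List.mem_cons_self) h2
            · exact ih p (h ▸ List.mem_cons_of_mem a h1)

lemma mem_dropLast_cons {α : Type} (x a : α) (l : List α) (h : x ∈ l.dropLast) :
    x ∈ (a :: l).dropLast := by
  cases l with
  | nil => simp at h
  | cons b t => rw [List.dropLast_cons₂]; exact List.mem_cons_of_mem a h

-- if the join of slash-free parts is n ++ '/' :: b with n slash-free, n is the head part (not last)
lemma head_seg_aux (n : List Char) (hn : ('/' : Char) ∉ n) (b q : List Char)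
    (rest' : List (List Char)) (hP : ∀ p ∈ q :: rest', ('/' : Char) ∉ p)
    (h : pvJoin (q :: rest') = n ++ '/' :: b) :
    n ∈ (q :: rest').dropLast := by
  cases rest' with
  | nil =>
      exfalso
      simp only [pvJoin] at h
      exact hP q (by simp) (by rw [h]; simp)
  | cons r rest'' =>
      have h' : q ++ ('/' :: pvJoin (r :: rest'')) = n ++ ('/' :: b) := by
        simpa [pvJoin] using h
      rcases List.append_eq_append_iff.mp h' with ⟨as, h1, h2⟩ | ⟨bs, h1, h2⟩
      · cases as with
        | nil =>
            simp at h1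
            rw [List.dropLast_cons₂, h1]
            exact List.mem_cons_self
        | cons d as' =>
            exfalso
            have hd : d = '/' := by
              have h3 := congrArg (fun l => l.head?) h2
              simp at h3
              exact h3.symm
            exact hn (by rw [h1, hd]; simp)
      · cases bs with
        | nil =>
            simp at h1
            rw [List.dropLast_cons₂, ← h1]
            exact List.mem_cons_self
        | cons d bs' =>
            exfalso
            have hd : d = '/' := by
              have h3 := congrArg (fun l => l.head?) h2
              simp at h3
              exact h3.symm
            exact hP q (by simp) (by rw [h1, hd]; simp)

-- the key lemma: '/name/' is a substring of the joined parts iff name is an interior part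
lemma infix_iff_mem_interior (n : List Char) (hn : ('/' : Char) ∉ n) :
    ∀ P : List (List Char), (∀ p ∈ P, ('/' : Char) ∉ p) →
      ((('/' :: (n ++ ['/'])) <:+: pvJoin P) ↔ n ∈ (P.drop 1).dropLast) := by
  intro P
  induction P with
  | nil =>
      intro _
      simp only [pvJoin, List.drop_nil, List.dropLast_nil, List.not_mem_nil, iff_false]
      intro h
      have := h.length_le
      simp at this
  | cons p rest ih =>
      intro hP
      cases rest with
      | nil =>
          simp only [pvJoin, List.drop_succ_cons, List.drop_zero, List.dropLast_nil,
            List.not_mem_nil, iff_false]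
          intro h
          exact hP p (by simp) (h.subset (by simp))
      | cons q rest' =>
          have ih' := ih (fun x hx => hP x (List.mem_cons_of_mem p hx))
          simp only [List.drop_succ_cons, List.drop_zero] at ih' ⊢
          have hT : pvJoin (p :: q :: rest') = p ++ '/' :: pvJoin (q :: rest') := rfl
          rw [hT]
          constructor
          · rintro ⟨a, b, hab⟩
            have hab' : a ++ (('/' :: (n ++ ['/'])) ++ b) = p ++ ('/' :: pvJoin (q :: rest')) := by
              simpa [List.append_assoc] using hab
            rcases List.append_eq_append_iff.mp hab' with ⟨as, h1, h2⟩ | ⟨bs, h1, h2⟩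
            · cases as with
              | nil =>
                  have h3 : pvJoin (q :: rest') = n ++ '/' :: b := by
                    have := h2
                    simp at this
                    simpa using this.symm
                  exact head_seg_aux n hn b q rest'
                    (fun x hx => hP x (List.mem_cons_of_mem p hx)) h3
              | cons d as' =>
                  exfalso
                  have hd : d = '/' := by
                    have h3 := congrArg (fun l => l.head?) h2
                    simp at h3
                    exact h3.symm
                  exact hP p (by simp) (by rw [h1, hd]; simp)
            · cases bs with
              | nil =>
                  have h3 : pvJoin (q :: rest') = n ++ '/' :: b := by
                    have := h2
                    simp at this
                    simpa using this
                  exact head_seg_aux n hn b q rest'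
                    (fun x hx => hP x (List.mem_cons_of_mem p hx)) h3
              | cons d bs' =>
                  have htail : pvJoin (q :: rest') = bs' ++ (('/' :: (n ++ ['/'])) ++ b) := by
                    have := congrArg List.tail h2
                    simpa using this
                  have hinf : ('/' :: (n ++ ['/'])) <:+: pvJoin (q :: rest') :=
                    ⟨bs', b, by rw [htail]; simp [List.append_assoc]⟩
                  exact mem_dropLast_cons n q rest' (ih'.mp hinf)
          · intro hmem
            cases rest' with
            | nil => simp at hmem
            | cons r rest'' =>
                rw [List.dropLast_cons₂] at hmem
                rcases List.mem_cons.mp hmem with h1 | h1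
                · subst h1
                  refine ⟨p, pvJoin (r :: rest''), ?_⟩
                  simp [pvJoin, List.append_assoc]
                · have hinf : ('/' :: (n ++ ['/'])) <:+: pvJoin (q :: r :: rest'') :=
                    ih'.mpr h1
                  exact hinf.trans ⟨p ++ ['/'], [], by simp [List.append_assoc]⟩

-- Python's xs[1:-1]
lemma slice_one_negone {α : Type} (xs : List α) :
    PySem.List.slice xs (some 1) (some (-1)) = (xs.drop 1).dropLast := by
  cases xs with
  | nil => simp [PySem.List.slice, PySem.List.clampIdx]
  | cons x t =>
      have ha : PySem.List.clampIdx (x :: t).length 1 = 1 := by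
        simp [PySem.List.clampIdx]
      have hb : PySem.List.clampIdx (x :: t).length (-1) = t.length := by
        simp [PySem.List.clampIdx]
      simp only [PySem.List.slice, ha, hb]
      rw [List.drop_one, List.tail_cons, List.dropLast_eq_take]

lemma kw_eq : pvKeywords = pvNames.map (fun nm => String.ofList ('/' :: nm.toList ++ ['/'])) := by
  decide

lemma names_no_slash : ∀ nm ∈ pvNames, ('/' : Char) ∉ nm.toList := by decide

-- A's per-URL keyword scan agrees with B's per-entry segment test
lemma cond_eq (url : String) :
    (pvKeywords.any fun keyword => PySem.Str.isIn keyword (PySem.Str.lower url)) =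
    (! PySem.Set.isdisjoint pvCountries
        (PySem.List.slice ((PySem.Str.split? (PySem.Str.lower url) "/").getD []) (some 1) (some (-1)))) := by
  rw [Bool.eq_iff_iff, Bool.not_eq_eq_eq_not, Bool.not_true, Bool.eq_false_iff,
    Ne, PySem.Set.isdisjoint_iff]
  have hsplit : (PySem.Str.split? (PySem.Str.lower url) "/").getD []
      = (pvSplit (PySem.Str.lower url).toList).map String.ofList := by
    rw [show PySem.Str.split? (PySem.Str.lower url) "/"
        = Option.map (List.map String.ofList)
            (PySem.Chars.split? (PySem.Str.lower url).toList "/".toList) from rfl]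
    simp [PySem.Chars.split?, splitOn_eq_pvSplit]
  rw [hsplit, slice_one_negone, kw_eq, ← List.map_drop, ← List.map_dropLast]
  simp only [List.any_eq_true, not_forall, not_not, List.mem_map]
  constructor
  · rintro ⟨k, ⟨nm, hnm, rfl⟩, hk⟩
    refine ⟨nm, ?_, ⟨nm.toList, ?_, by simp⟩⟩
    · unfold pvCountries
      rw [PySem.Set.mem_ofList]
      exact hnm
    · rw [PySem.Str.isIn_eq, String.toList_ofList] at hk
      have := (PySem.Chars.isIn_iff_infix _ _).mp hk
      rw [show (PySem.Str.lower url).toList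
            = pvJoin (pvSplit (PySem.Str.lower url).toList) from
            (pvJoin_pvSplit _).symm] at this
      exact (infix_iff_mem_interior nm.toList (names_no_slash nm hnm) _
        (pvSplit_no_slash _)).mp (by simpa using this)
  · rintro ⟨nm, hnm, ⟨c, hc, hceq⟩⟩
    have hnm' : nm ∈ pvNames := by
      unfold pvCountries at hnm
      rwa [PySem.Set.mem_ofList] at hnm
    have hcn : c = nm.toList := by
      have := congrArg String.toList hceq
      simpa [String.toList_ofList] using this
    refine ⟨String.ofList ('/' :: nm.toList ++ ['/']), ⟨nm, hnm', rfl⟩, ?_⟩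
    rw [PySem.Str.isIn_eq, String.toList_ofList]
    apply (PySem.Chars.isIn_iff_infix _ _).mpr
    rw [show (PySem.Str.lower url).toList
          = pvJoin (pvSplit (PySem.Str.lower url).toList) from (pvJoin_pvSplit _).symm]
    exact (infix_iff_mem_interior nm.toList (names_no_slash nm hnm') _
      (pvSplit_no_slash _)).mpr (hcn ▸ hc)

-- ===== VERDICT (by name: the statement is the Claim_ definition above) =====
theorem sitemap_filter_spec : Claim_equal_sitemap_filter := by
  intro entries _ _
  unfold Spec_sitemap_filter sitemap_filter_alt sitemap_filter
  rw [pvCollect_eq, List.reverse_nil, List.nil_append]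
  apply List.filter_congr
  intro entry _
  unfold pvWanted
  cases PySem.Dict.get? (PySem.Dict.mk entry) "loc" with
  | none => rfl
  | some url => exact cond_eq url
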